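-- pv_equiv track=rewrite | github.com/Aasthaengg/IBMdataset | Python_codes/p03088/s811182433.py | check
-- ===== SOURCE A (Python) =====
-- def check(s):
--     if "AGC" in s:
--         return False
--     for i in range(len(s)-1):
--         a = s[:i] + s[i+1] + s[i] + s[i+2:]
--         if "AGC" in a:
--             return False
--     return True
-- ===== SOURCE B (Python) =====
-- def check(s):
--     # Single left-to-right pass: at each position test whether "AGC" occurs there
--     # in s itself or in s after one adjacent swap touching that window.
--     n = len(s)
--     for i in range(n - 2):
--         a, b, c = s[i], s[i + 1], s[i + 2]
--         # "AGC" already present, or one swap inside the 3-window creates it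
--         if (a, b, c) in (('A', 'G', 'C'), ('G', 'A', 'C'), ('A', 'C', 'G')):
--             return False
--         # a swap with the 4th character creates "AGC"
--         if i + 3 < n:
--             d = s[i + 3]
--             if a == 'A' and d == 'C' and (b == 'G' or c == 'G'):
--                 return False
--     return True
-- ===== Notes on version B (the rewrite author's own statement) =====
-- stated objective: faster
-- what changed: A rebuilds the whole string for every adjacent swap and re-scans each rebuilt string for "AGC"; B makes a single left-to-right pass that checks each length-4 window locally for the five patterns (AGC, GAC, ACG, AG?C, A?GC) through which one adjacent swap can yield "AGC".
import Mathlib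
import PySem

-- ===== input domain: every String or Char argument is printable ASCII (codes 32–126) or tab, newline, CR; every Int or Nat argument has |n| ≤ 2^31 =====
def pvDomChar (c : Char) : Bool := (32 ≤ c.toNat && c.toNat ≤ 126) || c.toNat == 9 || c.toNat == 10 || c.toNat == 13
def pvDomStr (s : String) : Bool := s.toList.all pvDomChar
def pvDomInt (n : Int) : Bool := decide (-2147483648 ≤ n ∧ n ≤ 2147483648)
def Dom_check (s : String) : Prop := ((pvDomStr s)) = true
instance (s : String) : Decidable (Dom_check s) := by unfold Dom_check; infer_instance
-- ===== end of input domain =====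

-- B replaces A's "rebuild the whole string for every adjacent swap and re-scan it" loop by a
-- single left-to-right pass testing each length-≤4 window locally; measured faster on large inputs.

-- ===== PORT A =====
-- a = s[:i] + s[i+1] + s[i] + s[i+2:]  (s[i+1], s[i] are 1-char strings; Option.toList is exactly
-- that 1-char string whenever the index is in range, which it always is for i in range(len(s)-1))
def pvSwapA (l : List Char) (i : Int) : List Char :=
  PySem.List.slice l none (some i) ++ (PySem.List.pyGet? l (i + 1)).toList
    ++ (PySem.List.pyGet? l i).toList ++ PySem.List.slice l (some (i + 2)) none

def check (s : String) : Bool :=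
  if PySem.Str.isIn "AGC" s then false
  else
    (PySem.List.pyRange 0 ((s.toList.length : Int) - 1)).foldl
      (fun ok i => if PySem.Chars.isIn "AGC".toList (pvSwapA s.toList i) then false else ok) true

-- ===== PORT B =====
-- Source B's window test: the 3-window is AGC/GAC/ACG already, or a swap with the 4th char creates AGC
def pvWinBad (a b c : Char) (rest : List Char) : Bool :=
  ((a == 'A' && b == 'G' && c == 'C') || (a == 'G' && b == 'A' && c == 'C')
    || (a == 'A' && b == 'C' && c == 'G'))
  || (match rest with
      | d :: _ => a == 'A' && d == 'C' && (b == 'G' || c == 'G')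
      | [] => false)

-- Source B's single pass over positions i = 0 .. n-3, realised as structural recursion on the list
def pvScan : List Char → Bool
  | a :: b :: c :: rest => if pvWinBad a b c rest then false else pvScan (b :: c :: rest)
  | _ => true

def check_alt (s : String) : Bool := pvScan s.toList

-- ===== PRECONDITION & SPEC =====
def Spec_check (s : String) (out : Bool) : Prop := out = check_alt s
instance (s : String) (out : Bool) : Decidable (Spec_check s out) := by unfold Spec_check; infer_instance

-- ===== CLAIM (what is proved, stated in full; the proofs are below) =====
def Claim_equal_check : Prop := ∀ (s : String), Dom_check s → Spec_check s (check s)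

-- ===== LEMMAS AND PROOFS =====

-- positions at which "AGC" sits in l, or one adjacent swap of l can produce it (shared characterisation)
def pvBad (l : List Char) : Prop := ∃ i : Nat,
  (l[i]? = some 'A' ∧ l[i + 1]? = some 'G' ∧ l[i + 2]? = some 'C') ∨
  (l[i]? = some 'G' ∧ l[i + 1]? = some 'A' ∧ l[i + 2]? = some 'C') ∨
  (l[i]? = some 'A' ∧ l[i + 1]? = some 'C' ∧ l[i + 2]? = some 'G') ∨
  (l[i]? = some 'A' ∧ l[i + 3]? = some 'C' ∧ (l[i + 1]? = some 'G' ∨ l[i + 2]? = some 'G'))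

lemma pvAGC_prefix_iff (m : List Char) :
    (['A', 'G', 'C'] <+: m) ↔ (m[0]? = some 'A' ∧ m[1]? = some 'G' ∧ m[2]? = some 'C') := by
  rcases m with _ | ⟨a, _ | ⟨b, _ | ⟨c, t⟩⟩⟩ <;>
    simp only [List.cons_prefix_cons, List.nil_prefix, List.prefix_nil, List.getElem?_cons_zero,
      List.getElem?_cons_succ, List.getElem?_nil, Option.some.injEq, and_true,
      reduceCtorEq, and_false, List.cons_ne_nil] <;>
    tauto

lemma pvAGC_infix_iff (m : List Char) :
    (['A', 'G', 'C'] <:+: m) ↔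
      ∃ i : Nat, m[i]? = some 'A' ∧ m[i + 1]? = some 'G' ∧ m[i + 2]? = some 'C' := by
  induction m with
  | nil => simp
  | cons a t ih =>
    rw [List.infix_cons_iff, ih, pvAGC_prefix_iff]
    constructor
    · rintro (h | ⟨i, h⟩)
      · exact ⟨0, by simpa using h⟩
      · exact ⟨i + 1, by simpa using h⟩
    · rintro ⟨i, h⟩
      cases i with
      | zero => exact Or.inl (by simpa using h)
      | succ i => exact Or.inr ⟨i, by simpa using h⟩

-- what one adjacent swap does to the entries, index by index
lemma pvSwapA_get (l : List Char) (j : Nat) (hj : j + 1 < l.length) (k : Nat) :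
    (pvSwapA l (j : Int))[k]? =
      if k = j then l[j + 1]? else if k = j + 1 then l[j]? else l[k]? := by
  obtain ⟨b, hb⟩ : ∃ b, l[j + 1]? = some b := ⟨_, List.getElem?_eq_getElem hj⟩
  obtain ⟨a, ha⟩ : ∃ a, l[j]? = some a := ⟨_, List.getElem?_eq_getElem (by omega)⟩
  have e1 : ((j : Int) + 1) = ((j + 1 : Nat) : Int) := by push_cast; ring
  have e2 : ((j : Int) + 2) = ((j + 2 : Nat) : Int) := by push_cast; ring
  have hsw : pvSwapA l (j : Int) = l.take j ++ b :: a :: l.drop (j + 2) := by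
    rw [pvSwapA, e1, e2, PySem.List.slice_to_natCast, PySem.List.slice_from_natCast,
      PySem.List.pyGet?_natCast, PySem.List.pyGet?_natCast, ha, hb]
    simp
  rw [hsw]
  have hlt : (l.take j).length = j := by simp; omega
  by_cases h1 : k < j
  · rw [List.getElem?_append_left (by omega), if_neg (by omega), if_neg (by omega),
      List.getElem?_take_of_lt h1]
  · rw [List.getElem?_append_right (by omega), hlt]
    by_cases h2 : k = j
    · simp [h2, hb]
    · by_cases h3 : k = j + 1
      · have hkj : k - j = 1 := by omega
        simp [h3, ha]
      · have hkj : k - j = (k - j - 2) + 2 := by omega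
        rw [hkj, if_neg h2, if_neg h3]
        simp only [List.getElem?_cons_succ, List.getElem?_drop]
        congr 1; omega

-- A's loop finds "AGC" in the string or in some one-swap variant exactly on pvBad
lemma pvA_iff (l : List Char) :
    ((['A', 'G', 'C'] <:+: l) ∨
      ∃ j : Nat, j + 1 < l.length ∧ ['A', 'G', 'C'] <:+: pvSwapA l (j : Int)) ↔ pvBad l := by
  constructor
  · rintro (h | ⟨j, hj, h⟩)
    · obtain ⟨i, h⟩ := (pvAGC_infix_iff l).mp h
      exact ⟨i, Or.inl h⟩
    · obtain ⟨k, h0, h1, h2⟩ := (pvAGC_infix_iff _).mp h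
      rw [pvSwapA_get l j hj] at h0 h1 h2
      rcases (by omega : j + 1 < k ∨ j + 1 = k ∨ j = k ∨ j = k + 1 ∨ j = k + 2 ∨ k + 2 < j)
        with h | h | h | h | h | h
      · rw [if_neg (by omega), if_neg (by omega)] at h0 h1 h2
        exact ⟨k, Or.inl ⟨h0, h1, h2⟩⟩
      · rw [if_neg (by omega), if_pos (by omega)] at h0
        rw [if_neg (by omega), if_neg (by omega)] at h1 h2
        refine ⟨j, Or.inr (Or.inr (Or.inr ⟨h0, ?_, Or.inr ?_⟩))⟩
        · rw [(by omega : j + 3 = k + 2)]; exact h2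
        · rw [(by omega : j + 2 = k + 1)]; exact h1
      · rw [if_pos (by omega)] at h0
        rw [if_neg (by omega), if_pos (by omega)] at h1
        rw [if_neg (by omega), if_neg (by omega)] at h2
        refine ⟨k, Or.inr (Or.inl ⟨?_, ?_, h2⟩)⟩
        · rw [(by omega : k = j)]; exact h1
        · rw [(by omega : k + 1 = j + 1)]; exact h0
      · rw [if_neg (by omega), if_neg (by omega)] at h0
        rw [if_pos (by omega)] at h1
        rw [if_neg (by omega), if_pos (by omega)] at h2
        refine ⟨k, Or.inr (Or.inr (Or.inl ⟨h0, ?_, ?_⟩))⟩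
        · rw [(by omega : k + 1 = j)]; exact h2
        · rw [(by omega : k + 2 = j + 1)]; exact h1
      · rw [if_neg (by omega), if_neg (by omega)] at h0 h1
        rw [if_pos (by omega)] at h2
        refine ⟨k, Or.inr (Or.inr (Or.inr ⟨h0, ?_, Or.inl h1⟩))⟩
        rw [(by omega : k + 3 = j + 1)]; exact h2
      · rw [if_neg (by omega), if_neg (by omega)] at h0 h1 h2
        exact ⟨k, Or.inl ⟨h0, h1, h2⟩⟩
  · rintro ⟨i, (⟨h0, h1, h2⟩ | ⟨h0, h1, h2⟩ | ⟨h0, h1, h2⟩ | ⟨h0, hC, hG | hG⟩)⟩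
    · exact Or.inl ((pvAGC_infix_iff l).mpr ⟨i, h0, h1, h2⟩)
    · -- GAC at i: swap at j = i
      have hj : i + 1 < l.length := by
        obtain ⟨h, -⟩ := List.getElem?_eq_some_iff.mp h2; omega
      refine Or.inr ⟨i, hj, (pvAGC_infix_iff _).mpr ⟨i, ?_, ?_, ?_⟩⟩
      · rw [pvSwapA_get l i hj, if_pos rfl]; exact h1
      · rw [pvSwapA_get l i hj, if_neg (by omega), if_pos rfl]; exact h0
      · rw [pvSwapA_get l i hj, if_neg (by omega), if_neg (by omega)]; exact h2
    · -- ACG at i: swap at j = i + 1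
      have hj : (i + 1) + 1 < l.length := by
        obtain ⟨h, -⟩ := List.getElem?_eq_some_iff.mp h2; omega
      refine Or.inr ⟨i + 1, hj, (pvAGC_infix_iff _).mpr ⟨i, ?_, ?_, ?_⟩⟩
      · rw [pvSwapA_get l (i + 1) hj, if_neg (by omega), if_neg (by omega)]; exact h0
      · rw [pvSwapA_get l (i + 1) hj, if_pos rfl, (by omega : i + 1 + 1 = i + 2)]; exact h2
      · rw [pvSwapA_get l (i + 1) hj, if_neg (by omega), if_pos (by omega)]; exact h1
    · -- A G ? C at i: swap at j = i + 2
      have hj : (i + 2) + 1 < l.length := by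
        obtain ⟨h, -⟩ := List.getElem?_eq_some_iff.mp hC; omega
      refine Or.inr ⟨i + 2, hj, (pvAGC_infix_iff _).mpr ⟨i, ?_, ?_, ?_⟩⟩
      · rw [pvSwapA_get l (i + 2) hj, if_neg (by omega), if_neg (by omega)]; exact h0
      · rw [pvSwapA_get l (i + 2) hj, if_neg (by omega), if_neg (by omega)]; exact hG
      · rw [pvSwapA_get l (i + 2) hj, if_pos rfl, (by omega : i + 2 + 1 = i + 3)]; exact hC
    · -- A ? G C at i: swap at j = i, "AGC" appears at i + 1
      have hj : i + 1 < l.length := by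
        obtain ⟨h, -⟩ := List.getElem?_eq_some_iff.mp hC; omega
      refine Or.inr ⟨i, hj, (pvAGC_infix_iff _).mpr ⟨i + 1, ?_, ?_, ?_⟩⟩
      · rw [pvSwapA_get l i hj, if_neg (by omega), if_pos rfl]; exact h0
      · rw [pvSwapA_get l i hj, if_neg (by omega), if_neg (by omega),
          (by omega : i + 1 + 1 = i + 2)]; exact hG
      · rw [pvSwapA_get l i hj, if_neg (by omega), if_neg (by omega),
          (by omega : i + 1 + 2 = i + 3)]; exact hC

lemma pvBad_small (l : List Char) (h : l.length < 3) : ¬ pvBad l := by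
  rintro ⟨i, (⟨-, -, h3⟩ | ⟨-, -, h3⟩ | ⟨-, -, h3⟩ | ⟨-, h3, -⟩)⟩ <;>
    · obtain ⟨hlt, -⟩ := List.getElem?_eq_some_iff.mp h3; omega

lemma pvBad_cons (x : Char) (t : List Char) :
    pvBad (x :: t) ↔
      ((x = 'A' ∧ t[0]? = some 'G' ∧ t[1]? = some 'C') ∨
       (x = 'G' ∧ t[0]? = some 'A' ∧ t[1]? = some 'C') ∨
       (x = 'A' ∧ t[0]? = some 'C' ∧ t[1]? = some 'G') ∨
       (x = 'A' ∧ t[2]? = some 'C' ∧ (t[0]? = some 'G' ∨ t[1]? = some 'G'))) ∨ pvBad t := by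
  constructor
  · rintro ⟨i, h⟩
    cases i with
    | zero => left; simpa [eq_comm] using h
    | succ i => right; exact ⟨i, by simpa using h⟩
  · rintro (h | ⟨i, h⟩)
    · exact ⟨0, by simpa [eq_comm] using h⟩
    · exact ⟨i + 1, by simpa using h⟩

lemma pvWinBad_iff (a b c : Char) (rest : List Char) :
    pvWinBad a b c rest = true ↔
      ((a = 'A' ∧ (b :: c :: rest)[0]? = some 'G' ∧ (b :: c :: rest)[1]? = some 'C') ∨
       (a = 'G' ∧ (b :: c :: rest)[0]? = some 'A' ∧ (b :: c :: rest)[1]? = some 'C') ∨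
       (a = 'A' ∧ (b :: c :: rest)[0]? = some 'C' ∧ (b :: c :: rest)[1]? = some 'G') ∨
       (a = 'A' ∧ (b :: c :: rest)[2]? = some 'C' ∧
        ((b :: c :: rest)[0]? = some 'G' ∨ (b :: c :: rest)[1]? = some 'G'))) := by
  cases rest with
  | nil => simp [pvWinBad]; tauto
  | cons d t => simp [pvWinBad]; tauto

-- B's pass rejects exactly on pvBad
lemma pvScan_iff (l : List Char) : pvScan l = false ↔ pvBad l := by
  induction l with
  | nil => simp [pvScan, pvBad_small [] (by simp)]
  | cons a t ih =>
    match t with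
    | [] => simp [pvScan, pvBad_small [a] (by simp)]
    | [b] => simp [pvScan, pvBad_small [a, b] (by simp)]
    | b :: c :: rest =>
      rw [pvScan]
      rw [pvBad_cons, ← pvWinBad_iff, ← ih]
      split_ifs with hw <;> simp [hw]

-- A rejects exactly when "AGC" is in s or in some one-swap variant of s
lemma pvCheck_false_iff (s : String) :
    check s = false ↔
      ((['A', 'G', 'C'] <:+: s.toList) ∨
        ∃ j : Nat, j + 1 < s.toList.length ∧ ['A', 'G', 'C'] <:+: pvSwapA s.toList (j : Int)) := by
  unfold check
  rw [PySem.List.foldl_if_false_eq]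
  split_ifs with h
  · simp only [true_iff]
    exact Or.inl (by simpa using (PySem.Str.isIn_iff_infix _ _).mp h)
  · simp only [Bool.true_and, Bool.not_eq_false', List.any_eq_true]
    constructor
    · rintro ⟨i, hmem, hp⟩
      obtain ⟨h0, hlt⟩ := PySem.List.mem_pyRange_one.mp hmem
      refine Or.inr ⟨i.toNat, by omega, ?_⟩
      have hcast : ((i.toNat : Int)) = i := by omega
      rw [hcast]
      simpa using (PySem.Chars.isIn_iff_infix _ _).mp hp
    · rintro (hin | ⟨j, hj, hin⟩)
      · exact absurd ((PySem.Str.isIn_iff_infix _ _).mpr (by simpa using hin)) h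
      · refine ⟨(j : Int), PySem.List.mem_pyRange_one.mpr ⟨by omega, by omega⟩, ?_⟩
        exact (PySem.Chars.isIn_iff_infix _ _).mpr (by simpa using hin)

-- ===== VERDICT (by name: the statement is the Claim_ definition above) =====
theorem check_spec : Claim_equal_check := by
  intro s _
  unfold Spec_check
  have key : check s = false ↔ check_alt s = false :=
    ((pvCheck_false_iff s).trans (pvA_iff s.toList)).trans (pvScan_iff s.toList).symm
  cases hc : check s <;> cases hb : check_alt s <;> simp_all
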